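-- pv_equiv track=rewrite | github.com/cgcardona/agentception | agentception/tools/file_tools.py | _truncate_rg_output
-- ===== SOURCE A (Python) =====
-- def _truncate_rg_output(output: str, n_results: int) -> str:
--     """Truncate ripgrep ``--heading`` output to at most *n_results* match lines.
--
--     In ``--heading`` mode rg emits a file-path header line, then numbered
--     match lines (``<lineno>:<content>``), then a blank separator between
--     file groups.  This function counts only the numbered match lines and
--     stops (dropping trailing headers/blanks) once the limit is reached so
--     the total returned is bounded regardless of how many files matched.
--     """
--     kept: list[str] = []
--     match_count = 0
--     for line in output.split("\n"):
--         # Numbered match lines in --heading mode start with digits followed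
--         # by ":" (e.g. "42:def foo():").  File headers and blank separators
--         # do not match this pattern.
--         if line and line[0].isdigit() and ":" in line:
--             if match_count >= n_results:
--                 break
--             match_count += 1
--         kept.append(line)
--     return "\n".join(kept).rstrip()
-- ===== SOURCE B (Python) =====
-- def _truncate_rg_output(output: str, n_results: int) -> str:
--     lines = output.split("\n")
--     idxs = [i for i, line in enumerate(lines)
--             if line and line[0].isdigit() and ":" in line]
--     n = max(n_results, 0)
--     cutoff = idxs[n] if len(idxs) > n else len(lines)
--     return "\n".join(lines[:cutoff]).rstrip()
-- ===== Notes on version B (the rewrite author's own statement) =====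
-- stated objective: alternative
-- what changed: Replaces the append-and-break counting loop by precomputing the indices of match lines once and cutting the line list at the n-th match index (clamped at 0) with a single slice.
import Mathlib
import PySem

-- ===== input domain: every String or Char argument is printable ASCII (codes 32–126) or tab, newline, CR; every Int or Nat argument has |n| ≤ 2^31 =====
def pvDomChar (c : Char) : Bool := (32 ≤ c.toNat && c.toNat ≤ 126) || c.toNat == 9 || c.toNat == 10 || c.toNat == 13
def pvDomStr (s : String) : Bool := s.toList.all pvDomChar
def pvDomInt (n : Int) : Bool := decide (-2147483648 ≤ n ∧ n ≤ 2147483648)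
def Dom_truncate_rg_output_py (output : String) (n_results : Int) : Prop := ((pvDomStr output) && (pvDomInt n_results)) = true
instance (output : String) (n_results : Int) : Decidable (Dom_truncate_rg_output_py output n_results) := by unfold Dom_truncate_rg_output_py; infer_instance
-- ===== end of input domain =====

-- B computes the cut point from the precomputed list of match-line indices and slices once,
-- instead of A's append-and-break counting loop (objective: alternative decomposition).

-- shared predicate: `line and line[0].isdigit() and ":" in line`
def pvIsMatchLine (l : String) : Bool :=
  match l.toList with
  | [] => false
  | c :: _ => PySem.Chars.isdigit c && PySem.Str.isIn ":" l

-- ===== PORT A =====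
def pvLoopA (n : Int) : List String → Int → List String
  | [], _ => []
  | l :: ls, c =>
    if pvIsMatchLine l then
      if c ≥ n then [] else l :: pvLoopA n ls (c + 1)
    else l :: pvLoopA n ls c

def truncate_rg_output_py (output : String) (n_results : Int) : String :=
  PySem.Str.rstrip (PySem.Str.join "\n" (pvLoopA n_results ((PySem.Str.split? output "\n").getD []) 0))

-- ===== PORT B =====
def truncate_rg_output_py_alt (output : String) (n_results : Int) : String :=
  let lines := (PySem.Str.split? output "\n").getD []
  let idxs := ((PySem.List.enumerate lines 0).filter (fun p => pvIsMatchLine p.2)).map (·.1)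
  let n := max n_results 0
  let cutoff : Int := if n < (idxs.length : Int) then (PySem.List.pyGet? idxs n).getD 0 else (lines.length : Int)
  PySem.Str.rstrip (PySem.Str.join "\n" (PySem.List.slice lines none (some cutoff)))

-- ===== PRECONDITION & SPEC =====
def Spec_truncate_rg_output_py (output : String) (n_results : Int) (out : String) : Prop := out = truncate_rg_output_py_alt output n_results
instance (output : String) (n_results : Int) (out : String) : Decidable (Spec_truncate_rg_output_py output n_results out) := by unfold Spec_truncate_rg_output_py; infer_instance

-- ===== CLAIM (what is proved, stated in full; the proofs are below) =====
def Claim_equal_truncate_rg_output_py : Prop := ∀ (output : String) (n_results : Int), Dom_truncate_rg_output_py output n_results → Spec_truncate_rg_output_py output n_results (truncate_rg_output_py output n_results)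

-- ===== LEMMAS AND PROOFS =====

-- cut point: number of leading lines kept when k more match lines may be taken
def pvCut (k : Int) : List String → Nat
  | [] => 0
  | l :: ls =>
    if pvIsMatchLine l then
      (if k ≤ 0 then 0 else pvCut (k - 1) ls + 1)
    else pvCut k ls + 1

theorem pvLoopA_eq_take (n : Int) : ∀ (ls : List String) (c : Int),
    pvLoopA n ls c = ls.take (pvCut (n - c) ls) := by
  intro ls
  induction ls with
  | nil => intro c; simp [pvLoopA, pvCut]
  | cons l ls ih =>
    intro c
    by_cases hp : pvIsMatchLine l
    · by_cases hc : c ≥ n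
      · simp [pvLoopA, pvCut, hp, hc, show n - c ≤ 0 by omega]
      · have : ¬ (n - c ≤ 0) := by omega
        simp [pvLoopA, pvCut, hp, hc, this, ih (c + 1), show n - c - 1 = n - (c + 1) by ring]
    · simp [pvLoopA, pvCut, hp, ih c]

theorem pvCut_clamp : ∀ (ls : List String) (k : Int), pvCut k ls = pvCut (max k 0) ls := by
  intro ls
  induction ls with
  | nil => intro k; simp [pvCut]
  | cons l ls ih =>
    intro k
    by_cases hp : pvIsMatchLine l
    · by_cases hk : k ≤ 0
      · simp [pvCut, hp, hk]
      · have h0 : ¬ (max k 0 ≤ (0:Int)) := by omega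
        simp [pvCut, hp, hk, h0, show max k 0 - 1 = k - 1 by omega]
    · simp [pvCut, hp, ih k]

theorem pv_toNat_step (j s : Int) (h : s + 1 ≤ j) : (j - (s + 1)).toNat + 1 = (j - s).toNat := by omega

-- the index list of match lines with enumeration start s
def pvE (ls : List String) (s : Int) : List Int :=
  ((PySem.List.enumerate ls s).filter (fun p => pvIsMatchLine p.2)).map (·.1)

theorem pvE_nil (s : Int) : pvE [] s = [] := by
  simp [pvE, PySem.List.enumerate_nil]

theorem pvE_cons (l : String) (ls : List String) (s : Int) :
    pvE (l :: ls) s = if pvIsMatchLine l then s :: pvE ls (s + 1) else pvE ls (s + 1) := by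
  by_cases hp : pvIsMatchLine l <;> simp [pvE, PySem.List.enumerate_cons, hp]

theorem pvE_ge : ∀ (ls : List String) (s j : Int), j ∈ pvE ls s → s ≤ j := by
  intro ls
  induction ls with
  | nil => intro s j h; simp [pvE_nil] at h
  | cons l ls ih =>
    intro s j h
    rw [pvE_cons] at h
    by_cases hp : pvIsMatchLine l
    · simp [hp] at h
      rcases h with h | h
      · omega
      · have := ih (s + 1) j h; omega
    · simp [hp] at h
      have := ih (s + 1) j h; omega

theorem pvCut_eq : ∀ (ls : List String) (s : Int) (m : Nat),
    pvCut (m : Int) ls = (match (pvE ls s)[m]? with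
      | some j => (j - s).toNat
      | none => ls.length) := by
  intro ls
  induction ls with
  | nil => intro s m; simp [pvCut, pvE_nil]
  | cons l ls ih =>
    intro s m
    rw [pvE_cons]
    by_cases hp : pvIsMatchLine l
    · cases m with
      | zero => simp [pvCut, hp]
      | succ m =>
        have hk : ¬ ((((m : Nat) + 1 : Nat) : Int) ≤ 0) := by push_cast; omega
        have harg : (((m : Nat) + 1 : Nat) : Int) - 1 = (m : Int) := by push_cast; ring
        simp only [pvCut, hp, if_true, hk, if_false, harg, ih (s + 1) m]
        cases hj : (pvE ls (s + 1))[m]? with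
        | none => simp [hj]
        | some j =>
          have hmem : j ∈ pvE ls (s + 1) := List.mem_of_getElem? hj
          have := pvE_ge ls (s + 1) j hmem
          simp [hj]
          exact pv_toNat_step j (s) this
    · simp only [pvCut, hp, ih (s + 1) m]
      cases hj : (pvE ls (s + 1))[m]? with
      | none => simp [hj]
      | some j =>
        have hmem : j ∈ pvE ls (s + 1) := List.mem_of_getElem? hj
        have := pvE_ge ls (s + 1) j hmem
        simp [hj]
        exact pv_toNat_step j s this

-- ===== VERDICT (by name: the statement is the Claim_ definition above) =====
theorem truncate_rg_output_py_spec : Claim_equal_truncate_rg_output_py := by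
  intro output n_results _
  unfold Spec_truncate_rg_output_py truncate_rg_output_py truncate_rg_output_py_alt
  set lines := (PySem.Str.split? output "\n").getD [] with hlines
  set m : Nat := n_results.toNat with hm
  have hmax : max n_results 0 = (m : Int) := by omega
  rw [pvLoopA_eq_take, sub_zero, pvCut_clamp, hmax, pvCut_eq lines 0 m]
  congr 2
  have hidx : List.map (fun x => x.1) (List.filter (fun p => pvIsMatchLine p.2) (PySem.List.enumerate lines)) = pvE lines 0 := rfl
  rw [hidx]
  by_cases hlt : m < (pvE lines 0).length
  · have hlt' : ((m : Int) < ((pvE lines 0).length : Int)) := by exact_mod_cast hlt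
    have hsome : (pvE lines 0)[m]? = some ((pvE lines 0)[m]) := List.getElem?_eq_getElem hlt
    have hge : (0 : Int) ≤ (pvE lines 0)[m] := pvE_ge lines 0 _ (List.getElem_mem hlt)
    rw [if_pos hlt', PySem.List.pyGet?_natCast, hsome]
    simp only [Option.getD_some]
    rw [PySem.List.slice_to lines hge]
    simp
  · have hlt' : ¬ ((m : Int) < ((pvE lines 0).length : Int)) := by exact_mod_cast hlt
    have hnone : (pvE lines 0)[m]? = none := List.getElem?_eq_none (by omega)
    rw [if_neg hlt', PySem.List.slice_to lines (by positivity)]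
    simp [hnone]
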